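-- pv_equiv track=rewrite | github.com/pypi-data/pypi-mirror-95 | packages/sma/sma-2.3.0-py3-none-any.whl/sma/helper.py | matchPositions
-- ===== SOURCE A (Python) =====
-- def matchPositions(signature : list,
--                    arities : list,
--                    roles : list = []) -> list:
--     """
--     Position matching is the process in which a signature (e.g. ``1, 2``) is mapped
--     to list of positions, i.e. ``sesType`` values in the network (e.g., :py:const:`sma.NODE_TYPE_ECO`,
--     :py:const:`sma.NODE_TYPE_SOC` in case of ecological triangles). Optionally,
--     a list of roles can be provides. This overwrites the position matching.
--
--     :param pattern: the signature
--     :param arities: the arities given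
--     :param roles: optional list of rolls
--     :returns: positions
--     :raises AssertionError: in case of mismatching signature/arities/roles
--     """
--     if len(roles) != 0:
--         # with roles
--         assert len(signature) == len(roles), \
--             'signature %s and roles %s must be of the same length' % (str(signature), str(roles))
--         if signature == arities:
--             return roles
--         else:
--             arities_positive = list(filter(lambda a : a > 0, arities))
--             assert len(arities_positive) == len(signature), \
--                 'signature %s and positive arities %s must be of the same length'\
--                 % (str(signature), str(arities_positive))
--             prepositions = matchPositions(signature, arities_positive)
--             return [roles[i] for i in prepositions]
--     else:
--         # without roles
--         positions = []
--         last = {}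
--         for p in signature:
--             if p in last:
--                 last[p] = arities.index(p, last[p]+1)
--             else:
--                 last[p] = arities.index(p)
--             positions.append(last[p])
--         return positions
-- ===== SOURCE B (Python) =====
-- def matchPositions(signature : list,
--                    arities : list,
--                    roles : list = []) -> list:
--     if len(roles) != 0:
--         assert len(signature) == len(roles), \
--             'signature %s and roles %s must be of the same length' % (str(signature), str(roles))
--         if signature == arities:
--             return roles
--         arities_positive = [a for a in arities if a > 0]
--         assert len(arities_positive) == len(signature), \
--             'signature %s and positive arities %s must be of the same length' \
--             % (str(signature), str(arities_positive))
--         return [roles[i] for i in _positions(signature, arities_positive)]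
--     return _positions(signature, arities)
--
-- def _positions(signature, arities):
--     # Inverted traversal: for each distinct value, pair its slots in the
--     # signature with its occurrence indices in arities, writing into a
--     # preallocated output array. The k-th slot of a value always receives the
--     # k-th index of that value in arities, so the per-value order of filling
--     # is immaterial.
--     out = [None] * len(signature)
--     for v in dict.fromkeys(signature):
--         slots = [j for j, p in enumerate(signature) if p == v]
--         idxs = [i for i, a in enumerate(arities) if a == v]
--         for j, i in zip(slots, idxs):
--             out[j] = i
--     return out
-- ===== Notes on version B (the rewrite author's own statement) =====
-- stated objective: alternative
-- what changed: B inverts the traversal: instead of A's left-to-right pass over the signature that resumes an arities.index scan from a remembered start per value, B iterates over the distinct signature values, pairs each value's slot positions in the signature with its occurrence indices in arities by two comprehensions and a zip, and writes the results into a preallocated output array by slot.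
import Mathlib
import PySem

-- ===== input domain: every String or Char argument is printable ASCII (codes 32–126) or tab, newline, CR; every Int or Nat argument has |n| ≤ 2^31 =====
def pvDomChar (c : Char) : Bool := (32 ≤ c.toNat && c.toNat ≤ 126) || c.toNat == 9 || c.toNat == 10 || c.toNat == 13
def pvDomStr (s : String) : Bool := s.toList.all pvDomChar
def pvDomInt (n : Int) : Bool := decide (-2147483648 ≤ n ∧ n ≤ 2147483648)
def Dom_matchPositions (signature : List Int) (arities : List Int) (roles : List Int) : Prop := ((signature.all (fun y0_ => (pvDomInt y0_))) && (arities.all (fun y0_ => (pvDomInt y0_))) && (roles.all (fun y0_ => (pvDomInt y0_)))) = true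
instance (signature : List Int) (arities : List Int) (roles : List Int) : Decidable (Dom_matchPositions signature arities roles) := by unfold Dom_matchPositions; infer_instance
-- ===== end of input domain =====

-- B inverts the traversal: per distinct signature value it zips that value's slots in the
-- signature with its occurrence indices in arities and fills a preallocated output by slot,
-- instead of A's left-to-right signature pass resuming arities.index scans (alternative algorithm).


-- ===== PORT A =====
-- `arities.index(p, start)` for a Nat start (here always last[p]+1 ≥ 1, so exact).
def pyIndexFromA (xs : List Int) (v : Int) (start : Nat) : Option Int :=
  (PySem.List.index? (xs.drop start) v).map (fun n => ((n + start : Nat) : Int))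

-- the `for p in signature` loop of A, with `last` the dict and early `none` = ValueError
def matchPositionsLoopA (arities : List Int) (sig : List Int)
    (last : PySem.Dict Int Int) (positions : List Int) : Option (List Int) :=
  match sig with
  | [] => some positions
  | p :: rest =>
    let idx? : Option Int :=
      match last.get? p with
      | some l => pyIndexFromA arities p (l + 1).toNat   -- stored l is always ≥ 0
      | none   => Option.map (fun n : Nat => (n : Int)) (PySem.List.index? arities p)
    match idx? with
    | none   => none   -- list.index raises ValueError: outside Pre_
    | some i => matchPositionsLoopA arities rest (last.insert p i) (positions ++ [i])

def matchPositions (signature : List Int) (arities : List Int) (roles : List Int) : List Int :=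
  if h : roles.length ≠ 0 then
    if signature.length = roles.length then
      if signature = arities then roles
      else
        let ap := arities.filter (fun a => decide (0 < a))
        if ap.length = signature.length then
          -- roles[i]: under Pre_ every returned i has 0 ≤ i < ap.length = roles.length
          (matchPositions signature ap []).map (fun i => (PySem.List.pyGet? roles i).getD 0)
        else []  -- AssertionError: outside Pre_
    else []      -- AssertionError: outside Pre_
  else
    (matchPositionsLoopA arities signature PySem.Dict.empty []).getD []  -- none = ValueError, outside Pre_
termination_by roles.length
decreasing_by simp only [List.length_nil]; omega

-- ===== PORT B =====
-- [j for j, p in enumerate(xs) if p == v]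
def occIdx (xs : List Int) (v : Int) : List Int :=
  ((PySem.List.enumerate xs 0).filter (fun p => p.2 == v)).map (·.1)

-- the inner `for j, i in zip(slots, idxs): out[j] = i` for one distinct value v
-- (slot indices come from enumerate, so they are ≥ 0 and in range: .set/.toNat are exact)
def fillOne (sig ar : List Int) (out : List (Option Int)) (v : Int) : List (Option Int) :=
  ((occIdx sig v).zip (occIdx ar v)).foldl (fun o pr => o.set pr.1.toNat (some pr.2)) out

-- out = [None]*len(sig); for v in dict.fromkeys(sig): …  (None survives only outside Pre_,
-- where Python A raises; the final .getD 0 merely coerces those excluded entries)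
def positionsB (sig ar : List Int) : List Int :=
  ((PySem.List.dedup sig).foldl (fillOne sig ar)
      (List.replicate sig.length (none : Option Int))).map (fun o => o.getD 0)

def matchPositions_alt (signature : List Int) (arities : List Int) (roles : List Int) : List Int :=
  if roles.length ≠ 0 then
    if signature.length = roles.length then
      if signature = arities then roles
      else
        let ap := arities.filter (fun a => decide (0 < a))
        if ap.length = signature.length then
          (positionsB signature ap).map (fun i => (PySem.List.pyGet? roles i).getD 0)
        else []
    else []
  else positionsB signature arities

-- ===== PRECONDITION & SPEC =====
-- every signature value occurs at least as often in the searched list: list.index never raises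
def OkCounts_matchPositions (sig : List Int) (ar : List Int) : Prop :=
  ∀ v ∈ sig, sig.count v ≤ ar.count v
-- exactly the inputs on which A returns normally (no AssertionError, no ValueError)
def Pre_matchPositions (signature : List Int) (arities : List Int) (roles : List Int) : Prop :=
  if roles = [] then OkCounts_matchPositions signature arities
  else signature.length = roles.length ∧
    (signature = arities ∨
      ((arities.filter (fun a => decide (0 < a))).length = signature.length ∧
        OkCounts_matchPositions signature (arities.filter (fun a => decide (0 < a)))))
instance (signature : List Int) (arities : List Int) (roles : List Int) : Decidable (Pre_matchPositions signature arities roles) := by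
  unfold Pre_matchPositions OkCounts_matchPositions; infer_instance
def pvWitness_matchPositions : List Int × List Int × List Int := ([1, 2, 1], [1, 2, 1, 3], [])

def Spec_matchPositions (signature : List Int) (arities : List Int) (roles : List Int) (out : List Int) : Prop := out = matchPositions_alt signature arities roles
instance (signature : List Int) (arities : List Int) (roles : List Int) (out : List Int) : Decidable (Spec_matchPositions signature arities roles out) := by unfold Spec_matchPositions; infer_instance

-- ===== CLAIM (what is proved, stated in full; the proofs are below) =====
def Claim_equal_matchPositions : Prop := ∀ (signature : List Int) (arities : List Int) (roles : List Int), Dom_matchPositions signature arities roles → Pre_matchPositions signature arities roles → Spec_matchPositions signature arities roles (matchPositions signature arities roles)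

-- ===== LEMMAS AND PROOFS =====

-- the list of indices at which v occurs in xs, offset by o (proof-only characterisation)
def idxF (xs : List Int) (v : Int) (o : Int) : List Int :=
  match xs with
  | [] => []
  | x :: t => if x = v then o :: idxF t v (o + 1) else idxF t v (o + 1)

theorem idxF_mem_bounds (xs : List Int) (v : Int) :
    ∀ (o : Int), ∀ i ∈ idxF xs v o, o ≤ i ∧ i < o + xs.length := by
  induction xs with
  | nil => intro o i hi; simp [idxF] at hi
  | cons x t ih =>
    intro o i hi
    simp only [idxF] at hi
    by_cases hx : x = v
    · rw [if_pos hx] at hi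
      rcases List.mem_cons.mp hi with rfl | hi
      · simp only [List.length_cons]; push_cast; omega
      · have := ih (o + 1) i hi
        simp only [List.length_cons] at this ⊢; push_cast at this ⊢; omega
    · rw [if_neg hx] at hi
      have := ih (o + 1) i hi
      simp only [List.length_cons] at this ⊢; push_cast at this ⊢; omega

theorem idxF_pairwise (xs : List Int) (v : Int) : ∀ (o : Int), (idxF xs v o).Pairwise (· < ·) := by
  induction xs with
  | nil => intro o; simp [idxF]
  | cons x t ih =>
    intro o
    simp only [idxF]
    split
    · exact List.Pairwise.cons (fun j hj => by have := (idxF_mem_bounds t v (o + 1) j hj).1; omega) (ih (o + 1))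
    · exact ih (o + 1)

theorem idxF_length (xs : List Int) (v : Int) : ∀ (o : Int), (idxF xs v o).length = xs.count v := by
  induction xs with
  | nil => intro o; simp [idxF]
  | cons x t ih =>
    intro o
    simp only [idxF, List.count_cons]
    by_cases hx : x = v
    · rw [if_pos hx, if_pos (by simp [hx])]
      simp [ih (o + 1)]
    · rw [if_neg hx, if_neg (by simpa using hx)]
      simp [ih (o + 1)]

theorem index?_map_add (xs : List Int) (v : Int) :
    ∀ (o : Int), Option.map (fun n : Nat => (n : Int) + o) (PySem.List.index? xs v) = (idxF xs v o)[0]? := by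
  induction xs with
  | nil => intro o; simp [PySem.List.index?_eq_idxOf?, idxF]
  | cons x t ih =>
    intro o
    by_cases hx : x = v
    · subst hx
      rw [PySem.List.index?_cons_self]
      simp [idxF]
    · rw [PySem.List.index?_cons_of_ne t hx]
      simp only [idxF, if_neg hx, Option.map_map]
      rw [← ih (o + 1)]
      cases PySem.List.index? t v with
      | none => rfl
      | some n => simp only [Option.map_some, Function.comp_apply]; congr 1; push_cast; ring

theorem idxF_split (s : Nat) (xs : List Int) (v o : Int) :
    idxF xs v o = idxF (xs.take s) v o ++ idxF (xs.drop s) v (o + s) := by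
  induction s generalizing xs o with
  | zero => simp [idxF]
  | succ s ih =>
    cases xs with
    | nil => simp [idxF]
    | cons x t =>
      simp only [List.take_succ_cons, List.drop_succ_cons, idxF]
      rw [ih t (o + 1)]
      have hc : (o + 1) + (s : Int) = o + ((s + 1 : Nat) : Int) := by push_cast; ring
      rw [hc]
      split <;> simp

-- the prefix of a strictly increasing split at the element after position k has length k+1
theorem prefix_len_of_pairwise (P Q : List Int) (k : Nat) (l : Int)
    (hpw : (P ++ Q).Pairwise (· < ·)) (hk : (P ++ Q)[k]? = some l)
    (hP : ∀ x ∈ P, x ≤ l) (hQ : ∀ x ∈ Q, l < x) : P.length = k + 1 := by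
  have hpw' := List.pairwise_iff_getElem.mp hpw
  have hk' : k < (P ++ Q).length := by
    by_contra h
    rw [List.getElem?_eq_none (by omega)] at hk
    simp at hk
  have hget : (P ++ Q)[k] = l := by
    rw [List.getElem?_eq_getElem hk'] at hk
    exact Option.some.inj hk
  have hkP : k < P.length := by
    by_contra h
    have hlen : k - P.length < Q.length := by
      simp only [List.length_append] at hk'; omega
    have h1 : (P ++ Q)[k] = Q[k - P.length]'hlen :=
      List.getElem_append_right (by omega)
    have h2 := hQ _ (List.getElem_mem hlen)
    rw [h1] at hget
    omega
  by_cases h2 : k + 1 < P.length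
  · exfalso
    have hk1 : k + 1 < (P ++ Q).length := by
      simp only [List.length_append]; omega
    have e1 : (P ++ Q)[k + 1]'hk1 = P[k + 1]'h2 := List.getElem_append_left h2
    have e2 : P[k + 1]'h2 ≤ l := hP _ (List.getElem_mem h2)
    have e3 := hpw' k (k + 1) hk' hk1 (by omega)
    rw [hget, e1] at e3
    omega
  · omega

theorem pyIndexFromA_next (ar : List Int) (v : Int) (k : Nat) (l : Int)
    (hk : (idxF ar v 0)[k]? = some l) :
    pyIndexFromA ar v (l + 1).toNat = (idxF ar v 0)[k + 1]? := by
  have hl0 : 0 ≤ l := by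
    have hmem : l ∈ idxF ar v 0 := List.mem_of_getElem? hk
    exact (idxF_mem_bounds ar v 0 l hmem).1
  set s : Nat := (l + 1).toNat with hs
  have hsl : (s : Int) = l + 1 := by omega
  have hsplit := idxF_split s ar v 0
  set P := idxF (ar.take s) v 0 with hP
  set Q := idxF (ar.drop s) v (0 + s) with hQ
  have hPb : ∀ x ∈ P, x ≤ l := by
    intro x hx
    have := (idxF_mem_bounds (ar.take s) v 0 x hx).2
    have hlen : (ar.take s).length ≤ s := by simp
    omega
  have hQb : ∀ x ∈ Q, l < x := by
    intro x hx
    have := (idxF_mem_bounds (ar.drop s) v (0 + s) x hx).1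
    omega
  have hpw : (P ++ Q).Pairwise (· < ·) := by rw [← hsplit]; exact idxF_pairwise ar v 0
  have hlenP : P.length = k + 1 :=
    prefix_len_of_pairwise P Q k l hpw (by rw [← hsplit]; exact hk) hPb hQb
  have hA : pyIndexFromA ar v s = Q[0]? := by
    unfold pyIndexFromA
    have hmap : (PySem.List.index? (ar.drop s) v).map (fun n => ((n + s : Nat) : Int))
        = Option.map (fun n : Nat => (n : Int) + (0 + (s : Int))) (PySem.List.index? (ar.drop s) v) := by
      cases PySem.List.index? (ar.drop s) v with
      | none => rfl
      | some n => simp only [Option.map_some]; congr 1; push_cast; ring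
    rw [hmap, index?_map_add (ar.drop s) v (0 + (s : Int))]
  rw [hA, hsplit]
  rw [List.getElem?_append_right (by omega)]
  congr 1
  omega

theorem enumerate_filter_map (xs : List Int) (v : Int) (s : Int) :
    ((PySem.List.enumerate xs s).filter (fun p => p.2 == v)).map (·.1) = idxF xs v s := by
  induction xs generalizing s with
  | nil => simp [PySem.List.enumerate_nil, idxF]
  | cons x t ih =>
    rw [PySem.List.enumerate_cons]
    by_cases hx : x = v
    · subst hx; simp [idxF, ih (s + 1)]
    · simp [idxF, hx, ih (s + 1)]

theorem occIdx_eq_idxF (xs : List Int) (v : Int) : occIdx xs v = idxF xs v 0 :=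
  enumerate_filter_map xs v 0

-- occurrence characterisations of idxF
theorem idxF_mem_spec (xs : List Int) (v : Int) :
    ∀ (o i : Int), i ∈ idxF xs v o → ∃ jn : Nat, i = o + jn ∧ xs[jn]? = some v := by
  induction xs with
  | nil => intro o i hi; simp [idxF] at hi
  | cons x t ih =>
    intro o i hi
    simp only [idxF] at hi
    by_cases hx : x = v
    · rw [if_pos hx] at hi
      rcases List.mem_cons.mp hi with rfl | hi
      · exact ⟨0, by simp, by simp [hx]⟩
      · obtain ⟨jn, h1, h2⟩ := ih (o + 1) i hi
        exact ⟨jn + 1, by push_cast; omega, by simpa using h2⟩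
    · rw [if_neg hx] at hi
      obtain ⟨jn, h1, h2⟩ := ih (o + 1) i hi
      exact ⟨jn + 1, by push_cast; omega, by simpa using h2⟩

theorem idxF_getElem_rank (xs : List Int) (v : Int) :
    ∀ (jn : Nat) (o : Int), xs[jn]? = some v →
      (idxF xs v o)[(xs.take jn).count v]? = some (o + jn) := by
  induction xs with
  | nil => intro jn o h; simp at h
  | cons x t ih =>
    intro jn o h
    cases jn with
    | zero =>
      simp only [List.getElem?_cons_zero, Option.some.injEq] at h
      subst h
      simp [idxF]
    | succ jn =>
      simp only [List.getElem?_cons_succ] at h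
      have hrec := ih jn (o + 1) h
      simp only [List.take_succ_cons, List.count_cons, idxF]
      by_cases hx : x = v
      · rw [if_pos hx, if_pos (by simp [hx])]
        simp only [List.getElem?_cons_succ]
        rw [hrec]
        congr 1
        push_cast; ring
      · rw [if_neg hx, if_neg (by simpa using hx)]
        simp only [Nat.add_zero]
        rw [hrec]
        congr 1
        push_cast; ring

-- generic facts about the slot-writing fold
theorem foldSet_length (pairs : List (Int × Int)) :
    ∀ (out : List (Option Int)),
      (pairs.foldl (fun o pr => o.set pr.1.toNat (some pr.2)) out).length = out.length := by
  induction pairs with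
  | nil => intro out; rfl
  | cons pr rest ih => intro out; rw [List.foldl_cons, ih]; simp

theorem foldSet_untouched (pairs : List (Int × Int)) :
    ∀ (out : List (Option Int)) (jn : Nat), (∀ pr ∈ pairs, pr.1.toNat ≠ jn) →
      (pairs.foldl (fun o pr => o.set pr.1.toNat (some pr.2)) out)[jn]? = out[jn]? := by
  induction pairs with
  | nil => intro out jn _; rfl
  | cons pr rest ih =>
    intro out jn h
    rw [List.foldl_cons, ih _ _ (fun q hq => h q (List.mem_cons_of_mem pr hq))]
    exact List.getElem?_set_ne (h pr (List.mem_cons_self))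

theorem foldSet_hit (rank : Nat) :
    ∀ (slots idxs : List Int) (out : List (Option Int)) (jn : Nat),
      slots.Pairwise (· < ·) → (∀ x ∈ slots, 0 ≤ x) →
      slots[rank]? = some (jn : Int) → rank < idxs.length → jn < out.length →
      ((slots.zip idxs).foldl (fun o pr => o.set pr.1.toNat (some pr.2)) out)[jn]? =
        some (some (idxs.getD rank 0)) := by
  induction rank with
  | zero =>
    intro slots idxs out jn hpw hnn hslot hrank hjn
    cases slots with
    | nil => simp at hslot
    | cons s slots' =>
      cases idxs with
      | nil => simp at hrank
      | cons i idxs' =>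
        simp only [List.getElem?_cons_zero, Option.some.injEq] at hslot
        subst hslot
        simp only [List.zip_cons_cons, List.foldl_cons]
        rw [foldSet_untouched]
        · rw [Int.toNat_natCast]
          rw [List.getElem?_set_self hjn]
          simp [List.getD]
        · intro pr hpr
          have hmem : pr.1 ∈ slots' := (List.of_mem_zip hpr).1
          have hlt : (jn : Int) < pr.1 := (List.pairwise_cons.mp hpw).1 pr.1 hmem
          omega
  | succ rank ih =>
    intro slots idxs out jn hpw hnn hslot hrank hjn
    cases slots with
    | nil => simp at hslot
    | cons s slots' =>
      cases idxs with
      | nil => simp at hrank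
      | cons i idxs' =>
        simp only [List.getElem?_cons_succ] at hslot
        simp only [List.zip_cons_cons, List.foldl_cons]
        have := ih slots' idxs' (out.set s.toNat (some i)) jn
          (List.pairwise_cons.mp hpw).2
          (fun x hx => hnn x (List.mem_cons_of_mem s hx))
          hslot (by simpa using hrank) (by simpa using hjn)
        rw [this]
        simp [List.getD]

-- effect of one distinct value's pass on one output position
theorem fillOne_miss (sig ar : List Int) (out : List (Option Int)) (v : Int) (jn : Nat)
    (h : sig[jn]? ≠ some v) : (fillOne sig ar out v)[jn]? = out[jn]? := by
  unfold fillOne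
  apply foldSet_untouched
  intro pr hpr
  have hmem : pr.1 ∈ occIdx sig v := (List.of_mem_zip hpr).1
  rw [occIdx_eq_idxF] at hmem
  obtain ⟨jn', h1, h2⟩ := idxF_mem_spec sig v 0 pr.1 hmem
  intro hcon
  have : jn' = jn := by omega
  exact h (this ▸ h2)

theorem fillOne_hit (sig ar : List Int) (out : List (Option Int)) (v : Int) (jn : Nat)
    (h : sig[jn]? = some v) (hrank : (sig.take jn).count v < (idxF ar v 0).length)
    (hjn : jn < out.length) :
    (fillOne sig ar out v)[jn]? = some (some ((idxF ar v 0).getD ((sig.take jn).count v) 0)) := by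
  unfold fillOne
  rw [occIdx_eq_idxF, occIdx_eq_idxF]
  apply foldSet_hit
  · exact idxF_pairwise sig v 0
  · exact fun x hx => (idxF_mem_bounds sig v 0 x hx).1
  · have := idxF_getElem_rank sig v jn 0 h
    simpa using this
  · exact hrank
  · exact hjn

theorem fillOne_length (sig ar : List Int) (out : List (Option Int)) (v : Int) :
    (fillOne sig ar out v).length = out.length := foldSet_length _ out

theorem foldFill_length (sig ar : List Int) (vs : List Int) :
    ∀ (out : List (Option Int)), (vs.foldl (fillOne sig ar) out).length = out.length := by
  induction vs with
  | nil => intro out; rfl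
  | cons v rest ih => intro out; rw [List.foldl_cons, ih, fillOne_length]

theorem foldFill_untouched (sig ar : List Int) (vs : List Int) :
    ∀ (out : List (Option Int)) (jn : Nat), (∀ v ∈ vs, sig[jn]? ≠ some v) →
      (vs.foldl (fillOne sig ar) out)[jn]? = out[jn]? := by
  induction vs with
  | nil => intro out jn _; rfl
  | cons v rest ih =>
    intro out jn h
    rw [List.foldl_cons, ih _ _ (fun w hw => h w (List.mem_cons_of_mem v hw))]
    exact fillOne_miss sig ar out v jn (h v List.mem_cons_self)

theorem foldFill_hit (sig ar : List Int) (vs : List Int) :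
    ∀ (out : List (Option Int)) (jn : Nat) (v0 : Int), vs.Nodup → v0 ∈ vs →
      sig[jn]? = some v0 → (sig.take jn).count v0 < (idxF ar v0 0).length → jn < out.length →
      (vs.foldl (fillOne sig ar) out)[jn]? =
        some (some ((idxF ar v0 0).getD ((sig.take jn).count v0) 0)) := by
  induction vs with
  | nil => intro out jn v0 _ hmem; simp at hmem
  | cons v rest ih =>
    intro out jn v0 hnd hmem hsig hrank hjn
    rw [List.foldl_cons]
    by_cases hv : v = v0
    · subst hv
      rw [foldFill_untouched sig ar rest _ jn]
      · exact fillOne_hit sig ar out v jn hsig hrank hjn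
      · intro w hw hcon
        have : w = v := by
          rw [hsig] at hcon
          exact (Option.some.inj hcon).symm
        exact (List.nodup_cons.mp hnd).1 (this ▸ hw)
    · have hmem' : v0 ∈ rest := by
        rcases List.mem_cons.mp hmem with h | h
        · exact absurd h.symm hv
        · exact h
      apply ih _ jn v0 (List.nodup_cons.mp hnd).2 hmem' hsig hrank
      rw [fillOne_length]
      exact hjn

-- the left-to-right specification both algorithms meet
def specGo (ar : List Int) (pre sig : List Int) : List Int :=
  match sig with
  | [] => []
  | p :: rest => (idxF ar p 0).getD (pre.count p) 0 :: specGo ar (pre ++ [p]) rest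

theorem specGo_length (ar : List Int) (sig : List Int) :
    ∀ (pre : List Int), (specGo ar pre sig).length = sig.length := by
  induction sig with
  | nil => intro pre; rfl
  | cons p rest ih => intro pre; simp [specGo, ih]

theorem specGo_getElem? (ar : List Int) (sig : List Int) :
    ∀ (pre : List Int) (jn : Nat), jn < sig.length →
      (specGo ar pre sig)[jn]? =
        some ((idxF ar (sig.getD jn 0) 0).getD ((pre ++ sig.take jn).count (sig.getD jn 0)) 0) := by
  induction sig with
  | nil => intro pre jn h; simp at h
  | cons p rest ih =>
    intro pre jn h
    cases jn with
    | zero => simp [specGo, List.getD]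
    | succ jn =>
      simp only [specGo, List.getElem?_cons_succ]
      rw [ih (pre ++ [p]) jn (by simpa using h)]
      simp [List.append_assoc, List.getD]

-- B computes the specification
theorem positionsB_eq_specGo (sig ar : List Int) (hok : OkCounts_matchPositions sig ar) :
    positionsB sig ar = specGo ar [] sig := by
  apply List.ext_getElem?
  intro jn
  have hlenB : (positionsB sig ar).length = sig.length := by
    unfold positionsB
    rw [List.length_map, foldFill_length, List.length_replicate]
  by_cases hjn : jn < sig.length
  · have hsig : sig[jn]? = some (sig.getD jn 0) := by
      rw [List.getD_eq_getElem?_getD, List.getElem?_eq_getElem hjn]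
      simp
    set v0 := sig.getD jn 0 with hv0
    have hmemv : v0 ∈ sig := by
      have := List.getElem_mem hjn
      rw [hv0, List.getD_eq_getElem?_getD, List.getElem?_eq_getElem hjn]
      simpa using this
    have hcountlt : (sig.take jn).count v0 < sig.count v0 := by
      have hsplit : sig = sig.take (jn + 1) ++ sig.drop (jn + 1) := (List.take_append_drop _ _).symm
      have htake : sig.take (jn + 1) = sig.take jn ++ [v0] := by
        rw [List.take_add_one, List.getElem?_eq_getElem hjn]
        congr 1
        rw [hv0, List.getD_eq_getElem?_getD, List.getElem?_eq_getElem hjn]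
        rfl
      calc (sig.take jn).count v0 < (sig.take jn ++ [v0]).count v0 := by
             simp [List.count_append]
        _ ≤ sig.count v0 := by
             conv_rhs => rw [hsplit, htake]
             simp [List.count_append]
    have hrank : (sig.take jn).count v0 < (idxF ar v0 0).length := by
      rw [idxF_length]
      exact lt_of_lt_of_le hcountlt (hok v0 hmemv)
    unfold positionsB
    rw [List.getElem?_map]
    rw [foldFill_hit sig ar (PySem.List.dedup sig) (List.replicate sig.length (none : Option Int)) jn v0
      (PySem.List.nodup_dedup sig) ((PySem.List.mem_dedup sig v0).mpr hmemv) hsig hrank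
      (by rw [List.length_replicate]; exact hjn)]
    rw [specGo_getElem? ar sig [] jn hjn]
    simp [hsig]
  · rw [List.getElem?_eq_none (by omega), List.getElem?_eq_none (by rw [specGo_length]; omega)]

-- ===== the A side: counter-loop bridge (proof-only helpers) =====
def buildOccurrences (arities : List Int) : PySem.Dict Int (List Int) :=
  (PySem.List.enumerate arities 0).foldl
    (fun d p => d.modify p.2 [] (fun l => l ++ [p.1])) PySem.Dict.empty

def counterLoop (occ : PySem.Dict Int (List Int)) (sig : List Int)
    (taken : PySem.Dict Int Int) (positions : List Int) : Option (List Int) :=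
  match sig with
  | [] => some positions
  | p :: rest =>
    let k := taken.getD p 0
    match PySem.List.pyGet? (occ.getD p []) k with
    | none   => none
    | some i => counterLoop occ rest (taken.insert p (k + 1)) (positions ++ [i])

theorem buildOccurrences_getD (ar : List Int) (v : Int) :
    (buildOccurrences ar).getD v [] = idxF ar v 0 := by
  unfold buildOccurrences
  have hfold : (PySem.List.enumerate ar 0).foldl
      (fun d p => d.modify p.2 [] (fun l => l ++ [p.1])) PySem.Dict.empty
      = ((PySem.List.enumerate ar 0).map (fun p => (p.2, p.1))).foldl
          (fun d p => d.modify p.1 [] (fun l => l ++ [p.2])) PySem.Dict.empty := by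
    rw [List.foldl_map]
  rw [hfold, PySem.Dict.getD_foldl_modify_append]
  rw [PySem.Dict.getD_empty]
  simp only [List.nil_append]
  rw [List.filter_map]
  rw [← enumerate_filter_map ar v 0, List.map_map]
  rfl

-- invariant tying A's `last` dict to the counter loop
def InvAB (ar : List Int) (last taken : PySem.Dict Int Int) : Prop :=
  ∀ v : Int, (last.get? v = none ∧ taken.getD v 0 = 0) ∨
    (∃ (k : Nat) (l : Int), taken.getD v 0 = (k : Int) + 1 ∧ last.get? v = some l ∧
      (idxF ar v 0)[k]? = some l)

theorem loopAB (ar : List Int) (sig : List Int) :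
    ∀ (last taken : PySem.Dict Int Int) (pos : List Int), InvAB ar last taken →
    matchPositionsLoopA ar sig last pos = counterLoop (buildOccurrences ar) sig taken pos := by
  induction sig with
  | nil => intro last taken pos _; rfl
  | cons p rest ih =>
    intro last taken pos hinv
    have hocc : (buildOccurrences ar).getD p [] = idxF ar p 0 := buildOccurrences_getD ar p
    rcases hinv p with ⟨hlast, htaken⟩ | ⟨k, l, htaken, hlast, hidx⟩
    · -- first occurrence of p in the signature
      have hA : (match last.get? p with
          | some l => pyIndexFromA ar p (l + 1).toNat
          | none   => Option.map (fun n : Nat => (n : Int)) (PySem.List.index? ar p)) = (idxF ar p 0)[0]? := by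
        rw [hlast]
        have h := index?_map_add ar p 0
        simp only [add_zero] at h
        exact h
      have hB : PySem.List.pyGet? ((buildOccurrences ar).getD p []) (taken.getD p 0)
          = (idxF ar p 0)[0]? := by
        rw [hocc, htaken]
        have : (0 : Int) = ((0 : Nat) : Int) := rfl
        rw [this, PySem.List.pyGet?_natCast]
      simp only [matchPositionsLoopA, counterLoop, hA, hB]
      cases hval : (idxF ar p 0)[0]? with
      | none => rfl
      | some i =>
        apply ih
        intro v
        by_cases hv : v = p
        · subst hv
          right
          exact ⟨0, i, by rw [PySem.Dict.getD_insert_self, htaken]; simp, by rw [PySem.Dict.get?_insert_self], hval⟩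
        · rcases hinv v with ⟨h1, h2⟩ | ⟨k', l', h1, h2, h3⟩
          · left
            exact ⟨by rw [PySem.Dict.get?_insert_of_ne _ _ hv]; exact h1,
                   by rw [PySem.Dict.getD_insert_of_ne _ _ _ hv]; exact h2⟩
          · right
            exact ⟨k', l', by rw [PySem.Dict.getD_insert_of_ne _ _ _ hv]; exact h1,
                   by rw [PySem.Dict.get?_insert_of_ne _ _ hv]; exact h2, h3⟩
    · -- p was seen before: A searches after l, the counter loop takes the next stored index
      have hA : (match last.get? p with
          | some l => pyIndexFromA ar p (l + 1).toNat
          | none   => Option.map (fun n : Nat => (n : Int)) (PySem.List.index? ar p)) = (idxF ar p 0)[k + 1]? := by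
        rw [hlast]
        exact pyIndexFromA_next ar p k l hidx
      have hB : PySem.List.pyGet? ((buildOccurrences ar).getD p []) (taken.getD p 0)
          = (idxF ar p 0)[k + 1]? := by
        rw [hocc, htaken]
        have : (k : Int) + 1 = ((k + 1 : Nat) : Int) := by push_cast; ring
        rw [this, PySem.List.pyGet?_natCast]
      simp only [matchPositionsLoopA, counterLoop, hA, hB]
      cases hval : (idxF ar p 0)[k + 1]? with
      | none => rfl
      | some i =>
        apply ih
        intro v
        by_cases hv : v = p
        · subst hv
          right
          refine ⟨k + 1, i, ?_, by rw [PySem.Dict.get?_insert_self], hval⟩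
          rw [PySem.Dict.getD_insert_self, htaken]; push_cast; ring
        · rcases hinv v with ⟨h1, h2⟩ | ⟨k', l', h1, h2, h3⟩
          · left
            exact ⟨by rw [PySem.Dict.get?_insert_of_ne _ _ hv]; exact h1,
                   by rw [PySem.Dict.getD_insert_of_ne _ _ _ hv]; exact h2⟩
          · right
            exact ⟨k', l', by rw [PySem.Dict.getD_insert_of_ne _ _ _ hv]; exact h1,
                   by rw [PySem.Dict.get?_insert_of_ne _ _ hv]; exact h2, h3⟩

-- the counter loop computes the specification whenever every index lookup succeeds
theorem counterLoop_eq_specGo (ar : List Int) (sig : List Int) :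
    ∀ (pre : List Int) (taken : PySem.Dict Int Int) (pos : List Int),
      (∀ v : Int, taken.getD v 0 = ((pre.count v : Nat) : Int)) →
      (∀ v ∈ sig, pre.count v + sig.count v ≤ ar.count v) →
      counterLoop (buildOccurrences ar) sig taken pos = some (pos ++ specGo ar pre sig) := by
  induction sig with
  | nil => intro pre taken pos _ _; simp [counterLoop, specGo]
  | cons p rest ih =>
    intro pre taken pos htaken hok
    have hlt : pre.count p < (idxF ar p 0).length := by
      rw [idxF_length]
      have := hok p List.mem_cons_self
      have hc : 1 ≤ (p :: rest).count p := by simp [List.count_cons]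
      omega
    have hget : PySem.List.pyGet? ((buildOccurrences ar).getD p []) (taken.getD p 0)
        = some ((idxF ar p 0).getD (pre.count p) 0) := by
      rw [buildOccurrences_getD, htaken p, PySem.List.pyGet?_natCast]
      rw [List.getElem?_eq_getElem hlt]
      congr 1
      exact (List.getD_eq_getElem _ 0 hlt).symm
    simp only [counterLoop, hget]
    rw [ih (pre ++ [p]) _ _ ?_ ?_]
    · simp [specGo]
    · intro v
      have hcnt : (pre ++ [p]).count v = pre.count v + (if p = v then 1 else 0) := by
        rw [List.count_append]
        simp [List.count_cons]
      by_cases hv : v = p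
      · subst hv
        rw [PySem.Dict.getD_insert_self, htaken v, hcnt]
        simp
      · rw [PySem.Dict.getD_insert_of_ne _ _ _ hv, htaken v, hcnt]
        have : ¬ (p = v) := fun hc => hv hc.symm
        simp [this]
    · intro v hv
      have h0 := hok v (List.mem_cons_of_mem p hv)
      have hcnt : (pre ++ [p]).count v = pre.count v + (if p = v then 1 else 0) := by
        rw [List.count_append]
        simp [List.count_cons]
      have hcnt2 : (p :: rest).count v = rest.count v + (if p = v then 1 else 0) := by
        simp [List.count_cons]
      rw [hcnt2] at h0
      rw [hcnt]
      by_cases hvp : p = v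
      · simp only [if_pos hvp] at h0 ⊢; omega
      · simp only [if_neg hvp] at h0 ⊢; omega

-- the two cores agree under OkCounts
theorem core_eq (sig ar : List Int) (hok : OkCounts_matchPositions sig ar) :
    (matchPositionsLoopA ar sig PySem.Dict.empty []).getD [] = positionsB sig ar := by
  rw [loopAB ar sig PySem.Dict.empty PySem.Dict.empty []
    (fun v => Or.inl ⟨PySem.Dict.get?_empty v, PySem.Dict.getD_empty v 0⟩)]
  rw [counterLoop_eq_specGo ar sig [] PySem.Dict.empty []
    (fun v => by rw [PySem.Dict.getD_empty]; simp)
    (fun v hv => by simpa using hok v hv)]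
  rw [positionsB_eq_specGo sig ar hok]
  simp

theorem matchPositions_eq (sig ar roles : List Int) (hpre : Pre_matchPositions sig ar roles) :
    matchPositions sig ar roles = matchPositions_alt sig ar roles := by
  rw [matchPositions.eq_def]
  unfold matchPositions_alt
  by_cases h : roles.length ≠ 0
  · have hroles : ¬ (roles = []) := by
      intro hc; subst hc; simp at h
    unfold Pre_matchPositions at hpre
    rw [if_neg hroles] at hpre
    obtain ⟨hlen, hdisj⟩ := hpre
    simp only [dif_pos h, if_pos h, if_pos hlen]
    by_cases heq : sig = ar
    · rw [if_pos heq, if_pos heq]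
    · rw [if_neg heq, if_neg heq]
      rcases hdisj with hc | ⟨hap, hok⟩
      · exact absurd hc heq
      · simp only [if_pos hap]
        rw [matchPositions.eq_def]
        simp only [List.length_nil, ne_eq, not_true_eq_false, dite_false]
        rw [core_eq _ _ hok]
  · have hroles : roles = [] := by
      rcases roles with _ | ⟨x, t⟩
      · rfl
      · simp at h
    subst hroles
    unfold Pre_matchPositions at hpre
    rw [if_pos rfl] at hpre
    simp only [dif_neg h, if_neg h]
    exact core_eq sig ar hpre

-- ===== VERDICT (by name: the statement is the Claim_ definition above) =====
theorem matchPositions_spec : Claim_equal_matchPositions := by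
  intro signature arities roles _ hpre
  unfold Spec_matchPositions
  exact matchPositions_eq signature arities roles hpre
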